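-- pv_equiv track=rewrite | github.com/runiaqq/polymarket_opinion_bot | utils/db.py | _format_pg
-- ===== SOURCE A (Python) =====
-- from typing import Any, Dict, Optional, Tuple, List
--
-- def _format_pg(sql: str, params: Dict[str, Any]) -> Tuple[str, Tuple[Any, ...]]:
--     mapping = []
--     formatted = ""
--     idx = 1
--     i = 0
--     while i < len(sql):
--         if sql[i] == ":":
--             j = i + 1
--             while j < len(sql) and (sql[j].isalnum() or sql[j] == "_"):
--                 j += 1
--             key = sql[i + 1 : j]
--             formatted += f"${idx}"
--             mapping.append(key)
--             idx += 1
--             i = j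
--         else:
--             formatted += sql[i]
--             i += 1
--     values = tuple(params.get(key) for key in mapping)
--     return formatted, values
-- ===== SOURCE B (Python) =====
-- def _word_split(part):
--     # (name, remainder): name is the maximal leading run of word characters
--     for i, c in enumerate(part):
--         if not (c == "_" or c.isalnum()):
--             return part[:i], part[i:]
--     return part, ""
--
-- def _format_pg(sql, params):
--     # staged passes: split once on ':', split each later chunk into (name, rest),
--     # then assemble text and values independently with comprehensions.
--     head, *rest = sql.split(":")
--     pieces = [_word_split(p) for p in rest]
--     formatted = head + "".join("$%d%s" % (n, tail)
--                                for n, (_, tail) in enumerate(pieces, 1))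
--     return formatted, tuple(params.get(name) for name, _ in pieces)
-- ===== Notes on version B (the rewrite author's own statement) =====
-- stated objective: idiomatic
-- what changed: B replaces A's index-based while-loop scanner with quadratic string concatenation by staged passes: split the string once on ':', map each later chunk to a (name, remainder) pair, then build the text with a single enumerate-join and the values with a comprehension.
-- outside the precondition, e.g. on _format_pg('SELECT :a', {}): A returns ('SELECT $1', (None,)), B returns ('SELECT $1', (None,))
import Mathlib
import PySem

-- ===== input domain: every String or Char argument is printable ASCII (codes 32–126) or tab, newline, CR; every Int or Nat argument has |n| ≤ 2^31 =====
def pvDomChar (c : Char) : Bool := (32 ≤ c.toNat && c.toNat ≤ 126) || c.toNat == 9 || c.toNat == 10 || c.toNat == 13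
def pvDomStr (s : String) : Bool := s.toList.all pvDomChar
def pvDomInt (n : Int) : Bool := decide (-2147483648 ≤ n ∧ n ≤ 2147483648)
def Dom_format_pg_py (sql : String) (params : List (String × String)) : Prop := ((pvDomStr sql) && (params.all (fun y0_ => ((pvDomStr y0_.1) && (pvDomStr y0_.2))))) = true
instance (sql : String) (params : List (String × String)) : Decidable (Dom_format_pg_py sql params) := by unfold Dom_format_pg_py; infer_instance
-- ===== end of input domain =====

-- B replaces A's stateful index-driven while-loop scanner by staged passes (split on ':',
-- map each chunk to a (name, remainder) pair, assemble text and values separately with a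
-- single join, avoiding A's repeated string concatenation); equivalence is about the return value only.

-- ===== PORT A =====
-- word characters of a parameter name in A: sql[j].isalnum() or sql[j] == "_"
def pvWord (c : Char) : Bool := PySem.Chars.isalnum c || c == '_'

-- the while-loop of A: state = (remaining chars, idx); returns (formatted chars, mapping)
def pvScanA : List Char → Nat → List Char × List (List Char)
  | [], _ => ([], [])
  | c :: rest, idx =>
    if c = ':' then
      -- inner while: j advances over word chars; key = sql[i+1:j]; resume at j
      let key := rest.takeWhile pvWord
      let r := pvScanA (rest.dropWhile pvWord) (idx + 1)
      ('$' :: PySem.Int.toChars (idx : Int) ++ r.1, key :: r.2)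
    else
      let r := pvScanA rest idx
      (c :: r.1, r.2)
  termination_by cs _ => cs.length
  decreasing_by
    · exact Nat.lt_succ_of_le (List.length_dropWhile_le _ _)
    · simp

def format_pg_py (sql : String) (params : List (String × String)) : String × List String :=
  let d := PySem.Dict.ofList params
  let r := pvScanA sql.toList 1
  (String.ofList r.1, r.2.map (fun k => d.getD (String.ofList k) ""))

-- ===== PORT B =====
-- B's _word_split(part): (maximal leading run of word chars, the remainder)
def pvWordB (c : Char) : Bool := c == '_' || PySem.Chars.isalnum c

def pvWordSplit (part : List Char) : List Char × List Char :=
  (part.takeWhile pvWordB, part.dropWhile pvWordB)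

def format_pg_py_alt (sql : String) (params : List (String × String)) : String × List String :=
  let d := PySem.Dict.ofList params
  let parts := PySem.Chars.splitOn sql.toList [':']          -- sql.split(":")
  let pieces := parts.tail.map pvWordSplit
  let formatted := parts.headD [] ++
    (PySem.List.enumerate pieces 1).flatMap
      (fun np => '$' :: PySem.Int.toChars np.1 ++ np.2.2)    -- "$%d%s" % (n, tail)
  (String.ofList formatted, pieces.map (fun pr => d.getD (String.ofList pr.1) ""))

-- ===== PRECONDITION & SPEC =====
-- Pre_ excludes inputs where some ':name' parameter in sql is missing from params: there
-- Python A returns a tuple containing None, which is not a value of the declared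
-- List String type (both Pythons still return the SAME value there).
def Pre_format_pg_py (sql : String) (params : List (String × String)) : Prop :=
  ∀ k ∈ ((PySem.Chars.splitOn sql.toList [':']).tail).map (fun p => String.ofList (p.takeWhile pvWord)),
    (PySem.Dict.ofList params).contains k = true
instance (sql : String) (params : List (String × String)) : Decidable (Pre_format_pg_py sql params) := by unfold Pre_format_pg_py; infer_instance

def pvWitness_format_pg_py : String × (List (String × String)) :=
  ("SELECT * FROM t WHERE a = :a AND b <= :b_2", [("a", "1"), ("b_2", "x")])

def Spec_format_pg_py (sql : String) (params : List (String × String)) (out : String × List String) : Prop := out = format_pg_py_alt sql params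
instance (sql : String) (params : List (String × String)) (out : String × List String) : Decidable (Spec_format_pg_py sql params out) := by unfold Spec_format_pg_py; infer_instance

-- ===== CLAIM (what is proved, stated in full; the proofs are below) =====
def Claim_equal_format_pg_py : Prop := ∀ (sql : String) (params : List (String × String)), Dom_format_pg_py sql params → Pre_format_pg_py sql params → Spec_format_pg_py sql params (format_pg_py sql params)

-- ===== LEMMAS AND PROOFS =====

theorem pvWordB_eq_pvWord : pvWordB = pvWord := by
  funext c; simp [pvWordB, pvWord, Bool.or_comm]

-- intermediate recursive form of B's staged rebuild, used only in the proof
def pvScanB : List (List Char) → Nat → List Char × List (List Char)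
  | [], _ => ([], [])
  | part :: more, n =>
    let r := pvScanB more (n + 1)
    ('$' :: PySem.Int.toChars (n : Int) ++ part.dropWhile pvWord ++ r.1,
     part.takeWhile pvWord :: r.2)

-- pvScanB is exactly B's enumerate/flatMap + map rebuild
theorem pvScanB_eq (ps : List (List Char)) : ∀ (n : Nat),
    pvScanB ps n =
      ((PySem.List.enumerate (ps.map pvWordSplit) (n : Int)).flatMap
         (fun np => '$' :: PySem.Int.toChars np.1 ++ np.2.2),
       (ps.map pvWordSplit).map (fun pr => pr.1)) := by
  induction ps with
  | nil => intro n; simp [pvScanB, PySem.List.enumerate_nil]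
  | cons p ps ih =>
    intro n
    have hcast : ((n : Int) + 1) = ((n + 1 : Nat) : Int) := by push_cast; ring
    simp only [pvScanB, List.map_cons, PySem.List.enumerate_cons, List.flatMap_cons, List.map,
      hcast, ih (n + 1), pvWordSplit, pvWordB_eq_pvWord]

-- reference splitter: what sql.split(":") computes, in structural form
def pvSplit : List Char → List (List Char)
  | [] => [[]]
  | c :: rest =>
    if c = ':' then [] :: pvSplit rest
    else
      match pvSplit rest with
      | [] => [[c]]
      | h :: t => (c :: h) :: t

theorem pvSplit_ne_nil (cs : List Char) : pvSplit cs ≠ [] := by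
  cases cs with
  | nil => simp [pvSplit]
  | cons c rest =>
    simp only [pvSplit]
    split
    · simp
    · split <;> simp

theorem pv_go_spec : ∀ (fuel : Nat) (l cur : List Char) (acc : List (List Char)),
    l.length < fuel →
    PySem.Chars.splitOn.go [':'] fuel l cur acc =
      acc.reverse ++ (cur.reverse ++ (pvSplit l).headD []) :: (pvSplit l).tail := by
  intro fuel
  induction fuel with
  | zero => intro l cur acc h; omega
  | succ fuel ih =>
    intro l cur acc h
    cases l with
    | nil =>
      simp [PySem.Chars.splitOn.go, pvSplit]
    | cons c rest =>
      by_cases hc : c = ':'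
      · subst hc
        have hpre : [':'].isPrefixOf (':' :: rest) = true := by simp [List.isPrefixOf]
        rw [PySem.Chars.splitOn.go, if_pos hpre]
        have ih' := ih rest [] (cur.reverse :: acc) (by simpa using Nat.lt_of_succ_lt_succ h)
        simp only [List.length_cons, List.length_nil, List.drop_succ_cons, List.drop_zero] at ih' ⊢
        rw [ih']
        obtain ⟨h0, t0, hs⟩ := List.exists_cons_of_ne_nil (pvSplit_ne_nil rest)
        simp [pvSplit, hs]
      · have hpre : [':'].isPrefixOf (c :: rest) = false := by
          simp [List.isPrefixOf]
          intro hcc; exact hc hcc.symm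
        rw [PySem.Chars.splitOn.go, if_neg (by simp [hpre])]
        have ih' := ih rest (c :: cur) acc (by simpa using Nat.lt_of_succ_lt_succ h)
        rw [ih']
        obtain ⟨h0, t0, hs⟩ := List.exists_cons_of_ne_nil (pvSplit_ne_nil rest)
        simp [pvSplit, hs, hc]

theorem pv_splitOn_eq (cs : List Char) :
    PySem.Chars.splitOn cs [':'] = pvSplit cs := by
  have h := pv_go_spec (cs.length + 1) cs [] [] (by omega)
  rw [PySem.Chars.splitOn, h]
  obtain ⟨h0, t0, hs⟩ := List.exists_cons_of_ne_nil (pvSplit_ne_nil cs)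
  simp [hs]

theorem pv_dropWhile_head (p : Char → Bool) : ∀ (l : List Char) (d : Char) (r : List Char),
    l.dropWhile p = d :: r → p d = false := by
  intro l
  induction l with
  | nil => intro d r h; simp at h
  | cons c cs ih =>
    intro d r h
    rw [List.dropWhile_cons] at h
    by_cases hc : p c = true
    · rw [if_pos hc] at h; exact ih d r h
    · rw [if_neg hc] at h
      cases h; simpa using hc

-- splitting a word-prefix (no ':' inside) prepends it to the first chunk
theorem pvSplit_word_append (key x : List Char) (hk : ∀ c ∈ key, c ≠ ':') :
    pvSplit (key ++ x) = (key ++ (pvSplit x).headD []) :: (pvSplit x).tail := by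
  induction key with
  | nil =>
    obtain ⟨h0, t0, hs⟩ := List.exists_cons_of_ne_nil (pvSplit_ne_nil x)
    simp [hs]
  | cons c key ih =>
    have hc : c ≠ ':' := hk c (by simp)
    have ih' := ih (fun d hd => hk d (by simp [hd]))
    simp only [List.cons_append, pvSplit, if_neg hc, ih']

theorem pv_head_split (l : List Char) (hl : ∀ d r, l = d :: r → pvWord d = false) :
    ((pvSplit l).headD []).takeWhile pvWord = [] := by
  cases l with
  | nil => simp [pvSplit]
  | cons d r =>
    have hd := hl d r rfl
    by_cases hdc : d = ':'
    · subst hdc; simp [pvSplit]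
    · obtain ⟨h2, t2, hs2⟩ := List.exists_cons_of_ne_nil (pvSplit_ne_nil r)
      simp [pvSplit, hdc, hs2, hd]

theorem pv_takeWhile_all_append (p : Char → Bool) (a b : List Char) (h : ∀ c ∈ a, p c = true) :
    (a ++ b).takeWhile p = a ++ b.takeWhile p := by
  induction a with
  | nil => simp
  | cons c a ih =>
    simp only [List.cons_append, List.takeWhile_cons, h c (by simp)]
    simp [ih (fun d hd => h d (by simp [hd]))]

-- also the drop side, for pvScanB's `part.dropWhile pvWord`
theorem pv_dropWhile_all_append (p : Char → Bool) (a b : List Char) (h : ∀ c ∈ a, p c = true) :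
    (a ++ b).dropWhile p = b.dropWhile p := by
  induction a with
  | nil => simp
  | cons c a ih =>
    simp only [List.cons_append, List.dropWhile_cons, h c (by simp)]
    simp [ih (fun d hd => h d (by simp [hd]))]

theorem pv_drop_split (l : List Char) (hl : ∀ d r, l = d :: r → pvWord d = false) :
    ((pvSplit l).headD []).dropWhile pvWord = (pvSplit l).headD [] := by
  cases l with
  | nil => simp [pvSplit]
  | cons d r =>
    have hd := hl d r rfl
    by_cases hdc : d = ':'
    · subst hdc; simp [pvSplit]
    · obtain ⟨h2, t2, hs2⟩ := List.exists_cons_of_ne_nil (pvSplit_ne_nil r)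
      simp [pvSplit, hdc, hs2, hd]

-- the main agreement: A's scan equals the recursive rebuild over the split of the same chars
theorem pv_main : ∀ (n : Nat) (cs : List Char) (idx : Nat), cs.length ≤ n →
    pvScanA cs idx =
      ((pvSplit cs).headD [] ++ (pvScanB (pvSplit cs).tail idx).1,
       (pvScanB (pvSplit cs).tail idx).2) := by
  intro n
  induction n with
  | zero =>
    intro cs idx h
    have : cs = [] := List.length_eq_zero_iff.mp (Nat.le_zero.mp h)
    subst this
    simp [pvScanA, pvSplit, pvScanB]
  | succ n ih =>
    intro cs idx h
    cases cs with
    | nil => simp [pvScanA, pvSplit, pvScanB]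
    | cons c rest =>
      by_cases hc : c = ':'
      · subst hc
        obtain ⟨h', t', hs'⟩ := List.exists_cons_of_ne_nil (pvSplit_ne_nil (rest.dropWhile pvWord))
        have hkcol : ∀ c ∈ rest.takeWhile pvWord, c ≠ ':' := by
          intro d hd hdc
          have h1 := List.mem_takeWhile_imp hd
          rw [hdc] at h1
          exact Bool.false_ne_true ((by decide : pvWord ':' = false) ▸ h1)
        have hsplit : pvSplit rest = (rest.takeWhile pvWord ++ h') :: t' := by
          conv_lhs => rw [← List.takeWhile_append_dropWhile (p := pvWord) (l := rest)]
          rw [pvSplit_word_append _ _ hkcol, hs']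
          simp
        have hh' : h'.takeWhile pvWord = [] := by
          have hgen := pv_head_split (rest.dropWhile pvWord)
            (fun d r hdr => pv_dropWhile_head pvWord rest d r hdr)
          rw [hs'] at hgen
          simpa using hgen
        have hh'd : h'.dropWhile pvWord = h' := by
          have hgen := pv_drop_split (rest.dropWhile pvWord)
            (fun d r hdr => pv_dropWhile_head pvWord rest d r hdr)
          rw [hs'] at hgen
          simpa using hgen
        have htake : (rest.takeWhile pvWord ++ h').takeWhile pvWord = rest.takeWhile pvWord := by
          rw [pv_takeWhile_all_append pvWord _ h' (fun d hd => List.mem_takeWhile_imp hd), hh']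
          simp
        have hdrop : (rest.takeWhile pvWord ++ h').dropWhile pvWord = h' := by
          rw [pv_dropWhile_all_append pvWord _ h' (fun d hd => List.mem_takeWhile_imp hd), hh'd]
        have ihA := ih (rest.dropWhile pvWord) (idx + 1)
          (le_trans (List.length_dropWhile_le _ _) (by simpa using Nat.le_of_succ_le_succ h))
        have hBsplit : pvSplit (':' :: rest) = [] :: (rest.takeWhile pvWord ++ h') :: t' := by
          simp [pvSplit, hsplit]
        simp only [pvScanA]
        rw [ihA, hs', hBsplit]
        simp [pvScanB, htake, hdrop, List.append_assoc]
      · -- non-colon character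
        obtain ⟨h', t', hs'⟩ := List.exists_cons_of_ne_nil (pvSplit_ne_nil rest)
        have ihA := ih rest idx (by simpa using Nat.le_of_succ_le_succ h)
        simp only [pvScanA, if_neg hc]
        rw [ihA, hs']
        have : pvSplit (c :: rest) = (c :: h') :: t' := by
          simp only [pvSplit, if_neg hc, hs']
        rw [this]
        simp

-- ===== VERDICT (by name: the statement is the Claim_ definition above) =====
theorem format_pg_py_spec : Claim_equal_format_pg_py := by
  intro sql params _ _
  unfold Spec_format_pg_py format_pg_py format_pg_py_alt
  rw [pv_splitOn_eq]
  have h := pv_main sql.toList.length sql.toList 1 le_rfl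
  rw [h, pvScanB_eq]
  simp only [List.map_map]
  rfl
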